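-- pv_equiv track=rewrite | github.com/kcmcveigh/mi_permutation_simulations | simulation_helpers.py | get_millisecond_ranges
-- ===== SOURCE A (Python) =====
-- def get_millisecond_ranges(cycle_lengths_ms):
--     """Get ranges of milliseconds for each cycle."""
--     last_end = 0
--     ranges = []
--     for length in cycle_lengths_ms:
--         start = last_end
--         end = start + length
--         last_end = end
--         ranges.append((start, end))
--     return ranges
-- ===== SOURCE B (Python) =====
-- from itertools import accumulate
--
-- def get_millisecond_ranges(cycle_lengths_ms):
--     """Get ranges of milliseconds for each cycle."""
--     ends = list(accumulate(cycle_lengths_ms, initial=0))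
--     return list(zip(ends, ends[1:]))
-- ===== Notes on version B (the rewrite author's own statement) =====
-- stated objective: idiomatic
-- what changed: Replaces the running-sum loop with explicit mutable state by a prefix-sum boundary table (itertools.accumulate with initial=0) paired via zip of consecutive boundaries.
import Mathlib
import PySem

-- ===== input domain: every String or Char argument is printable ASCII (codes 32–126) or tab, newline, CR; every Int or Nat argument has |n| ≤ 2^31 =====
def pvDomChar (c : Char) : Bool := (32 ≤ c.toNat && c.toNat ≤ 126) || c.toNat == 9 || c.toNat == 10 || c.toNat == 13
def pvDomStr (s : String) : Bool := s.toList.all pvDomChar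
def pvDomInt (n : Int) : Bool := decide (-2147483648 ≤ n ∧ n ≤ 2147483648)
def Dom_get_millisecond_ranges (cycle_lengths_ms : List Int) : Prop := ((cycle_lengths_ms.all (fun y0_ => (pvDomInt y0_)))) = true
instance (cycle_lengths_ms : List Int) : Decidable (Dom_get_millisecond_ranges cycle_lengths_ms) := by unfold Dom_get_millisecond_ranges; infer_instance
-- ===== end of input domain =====

-- B replaces A's running-sum accumulator loop by a prefix-sum boundary table zipped with its tail (idiomatic decomposition; same O(n) cost).


-- ===== PORT A =====
def get_millisecond_ranges (cycle_lengths_ms : List Int) : List (Int × Int) :=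
  (cycle_lengths_ms.foldl
    (fun (st : Int × List (Int × Int)) length =>
      let start := st.1
      let «end» := start + length
      («end», st.2 ++ [(start, «end»)]))
    (0, [])).2

-- ===== PORT B =====
-- itertools.accumulate(l, initial=s): the list of running sums, starting with s.
def pvAccumulate (s : Int) : List Int → List Int
  | [] => [s]
  | a :: l => s :: pvAccumulate (s + a) l

-- B: prefix-sum boundary table [0, c1, c1+c2, ...], then pair consecutive boundaries.
def get_millisecond_ranges_alt (cycle_lengths_ms : List Int) : List (Int × Int) :=
  let ends := pvAccumulate 0 cycle_lengths_ms
  ends.zip ends.tail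

-- ===== PRECONDITION & SPEC =====
def Spec_get_millisecond_ranges (cycle_lengths_ms : List Int) (out : List (Int × Int)) : Prop := out = get_millisecond_ranges_alt cycle_lengths_ms
instance (cycle_lengths_ms : List Int) (out : List (Int × Int)) : Decidable (Spec_get_millisecond_ranges cycle_lengths_ms out) := by unfold Spec_get_millisecond_ranges; infer_instance

-- ===== CLAIM (what is proved, stated in full; the proofs are below) =====
def Claim_equal_get_millisecond_ranges : Prop := ∀ (cycle_lengths_ms : List Int), Dom_get_millisecond_ranges cycle_lengths_ms → Spec_get_millisecond_ranges cycle_lengths_ms (get_millisecond_ranges cycle_lengths_ms)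

-- ===== LEMMAS AND PROOFS =====

-- ===== VERDICT (by name: the statement is the Claim_ definition above) =====
theorem pv_accumulate_head (l : List Int) (s : Int) :
    pvAccumulate s l = s :: (pvAccumulate s l).tail := by
  cases l <;> rfl

theorem pv_foldl_scanl (l : List Int) : ∀ (s : Int) (acc : List (Int × Int)),
    (l.foldl
      (fun (st : Int × List (Int × Int)) length =>
        let start := st.1
        let «end» := start + length
        («end», st.2 ++ [(start, «end»)]))
      (s, acc)).2
    = acc ++ ((pvAccumulate s l).zip (pvAccumulate s l).tail) := by
  induction l with
  | nil => intro s acc; simp [pvAccumulate]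
  | cons a l ih =>
      intro s acc
      simp only [List.foldl_cons]
      rw [ih]
      rw [show pvAccumulate s (a :: l) = s :: pvAccumulate (s + a) l from rfl]
      rw [pv_accumulate_head l (s + a)]
      simp [List.append_assoc]

theorem get_millisecond_ranges_spec : Claim_equal_get_millisecond_ranges := by
  intro l _
  unfold Spec_get_millisecond_ranges get_millisecond_ranges get_millisecond_ranges_alt
  simpa using pv_foldl_scanl l 0 []
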